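-- pv_equiv track=rewrite | github.com/yunari/2020_kakao_internship | programmers/level/level1/getting_report_result.py | solution
-- ===== SOURCE A (Python) =====
-- def solution(id_list, report, k):
--     report_list = {}
--     for id in id_list:
--         report_list[id] = [set(), int()]
--
--     for each_report in report:
--         report_split = each_report.split()
--         report_list[report_split[1]][0].add(report_split[0])
--
--     for id in report_list:
--         if len(report_list[id][0]) >= k:
--             for reporting_id in report_list[id][0]:
--                 report_list[reporting_id][1] += 1
--
--     answer = []
--
--     for id in id_list:
--         answer.append(report_list[id][1])
--
--     return answer
-- ===== SOURCE B (Python) =====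
-- def solution(id_list, report, k):
--     # table-free brute force: dedup pairs once, then recompute each answer element
--     # directly by nested scans over the pair list (no dicts/sets of running state)
--     pairs = []
--     for r in report:
--         s = r.split()
--         p = (s[0], s[1])
--         if p not in pairs:
--             pairs.append(p)
--
--     def reporters(t):
--         return sum(q[1] == t for q in pairs)
--
--     return [sum(p[0] == uid and reporters(p[1]) >= k for p in pairs) for uid in id_list]
-- ===== Notes on version B (the rewrite author's own statement) =====
-- stated objective: alternative
-- what changed: Removes A's mutable dict of per-target reporter sets and its mark/tally loops: B deduplicates the (reporter, target) pairs once and recomputes each answer element directly with nested scans over that pair list (no lookup tables at all).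
import Mathlib
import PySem

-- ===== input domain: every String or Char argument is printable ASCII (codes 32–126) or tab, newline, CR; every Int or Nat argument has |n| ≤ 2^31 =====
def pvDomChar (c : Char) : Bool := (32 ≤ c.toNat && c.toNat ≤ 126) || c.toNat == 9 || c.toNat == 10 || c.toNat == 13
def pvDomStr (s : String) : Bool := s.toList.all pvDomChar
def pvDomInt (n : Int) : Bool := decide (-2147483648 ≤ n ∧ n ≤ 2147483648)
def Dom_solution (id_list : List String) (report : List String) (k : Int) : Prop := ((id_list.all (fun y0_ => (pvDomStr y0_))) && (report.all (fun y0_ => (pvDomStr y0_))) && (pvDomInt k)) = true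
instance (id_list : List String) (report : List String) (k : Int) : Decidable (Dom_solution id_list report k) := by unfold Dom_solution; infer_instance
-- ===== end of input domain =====

-- B drops A's mutable dict-of-sets and its mark/tally loops entirely: it deduplicates the
-- (reporter, target) pairs once and recomputes each answer element directly by nested scans
-- (alternative, table-free decomposition; return values proved equal on Pre_).

-- ===== PORT A =====
-- literal port of Source A; where Python raises (IndexError/KeyError, excluded by Pre_) the
-- match falls through / modify inserts — outside Pre_ nothing is claimed.
-- body of A's second loop: report_list[report_split[1]][0].add(report_split[0])
def stepA (d : PySem.Dict String (PySem.Set String × Int)) (r : String) :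
    PySem.Dict String (PySem.Set String × Int) :=
  let ts := PySem.Str.split₀ r
  match PySem.List.pyGet? ts 1, PySem.List.pyGet? ts 0 with
  | some tgt, some rp => d.modify tgt (PySem.Set.empty, 0) (fun q => (PySem.Set.add q.1 rp, q.2))
  | _, _ => d

def solution (id_list : List String) (report : List String) (k : Int) : List Int :=
  -- report_list = {}; for id in id_list: report_list[id] = [set(), int()]
  let d0 : PySem.Dict String (PySem.Set String × Int) :=
    id_list.foldl (fun d id => d.insert id (PySem.Set.empty, 0)) PySem.Dict.empty
  -- for each_report in report: ...
  let d1 := report.foldl stepA d0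
  -- for id in report_list: if len(report_list[id][0]) >= k: for rp in ..: report_list[rp][1] += 1
  -- (the inner loop iterates a Python set; its +1 increments commute, so list order is exact)
  let d2 := d1.keys.foldl (fun d t =>
    let s := (d.getD t (PySem.Set.empty, 0)).1
    if k ≤ (s.length : Int) then
      s.foldl (fun d' rp => d'.modify rp (PySem.Set.empty, 0) (fun q => (q.1, q.2 + 1))) d
    else d) d1
  -- answer = []; for id in id_list: answer.append(report_list[id][1])
  id_list.foldl (fun acc id => acc ++ [(d2.getD id (PySem.Set.empty, 0)).2]) []

-- ===== PORT B =====
-- (s[0], s[1]) for a split report; the "" defaults stand for the IndexError inputs Pre_ excludes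
def pairOf (r : String) : String × String :=
  let ts := PySem.Str.split₀ r
  (PySem.List.pyGetD ts 0 "", PySem.List.pyGetD ts 1 "")

-- pairs = []; for r in report: p = (s[0], s[1]); if p not in pairs: pairs.append(p)
def bPairs (report : List String) : List (String × String) :=
  report.foldl (fun acc r =>
    let p := pairOf r
    if p ∈ acc then acc else acc ++ [p]) []

-- def reporters(t): return sum(q[1] == t for q in pairs)   (a 0/1 sum is countP)
def bReporters (pairs : List (String × String)) (t : String) : Int :=
  (pairs.countP (fun q => q.2 == t) : Int)

def solution_alt (id_list : List String) (report : List String) (k : Int) : List Int :=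
  let pairs := bPairs report
  -- [sum(p[0] == uid and reporters(p[1]) >= k for p in pairs) for uid in id_list]
  id_list.map (fun uid =>
    (pairs.countP (fun p => p.1 == uid && decide (k ≤ bReporters pairs p.2)) : Int))

-- ===== PRECONDITION & SPEC =====
-- number of distinct reporters of target t
def nReporters (report : List String) (t : String) : Nat :=
  ((PySem.List.dedup (report.map pairOf)).filter (fun p => p.2 == t)).length

-- exactly the inputs where A returns: every report splits into ≥ 2 tokens, every target is a
-- known id, and every reporter of a target with ≥ k distinct reporters is a known id
-- (otherwise Python raises IndexError / KeyError).
def Pre_solution (id_list : List String) (report : List String) (k : Int) : Prop :=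
  ∀ r ∈ report, 2 ≤ (PySem.Str.split₀ r).length ∧ (pairOf r).2 ∈ id_list ∧
    (k ≤ (nReporters report (pairOf r).2 : Int) → (pairOf r).1 ∈ id_list)
instance (id_list : List String) (report : List String) (k : Int) : Decidable (Pre_solution id_list report k) := by unfold Pre_solution; infer_instance

def pvWitness_solution : List String × List String × Int := (["muzi", "frodo"], ["muzi frodo"], 1)

def Spec_solution (id_list : List String) (report : List String) (k : Int) (out : List Int) : Prop := out = solution_alt id_list report k
instance (id_list : List String) (report : List String) (k : Int) (out : List Int) : Decidable (Spec_solution id_list report k out) := by unfold Spec_solution; infer_instance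

-- ===== CLAIM (what is proved, stated in full; the proofs are below) =====
def Claim_equal_solution : Prop := ∀ (id_list : List String) (report : List String) (k : Int), Dom_solution id_list report k → Pre_solution id_list report k → Spec_solution id_list report k (solution id_list report k)

-- ===== LEMMAS AND PROOFS =====

-- the set A stores at target t after its second loop (reporters of t, first-occurrence order)
def pvSig (l : List (String × String)) (t : String) : PySem.Set String :=
  PySem.Set.ofList ((l.filter (fun p => p.2 == t)).map (·.1))

-- zero-initialisation loops: every lookup with the initial value as default gives that value
theorem pvZeroInit {ν : Type} (v0 : ν) (ids : List String) (d : PySem.Dict String ν) (t : String)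
    (h : d.getD t v0 = v0) :
    (ids.foldl (fun d i => d.insert i v0) d).getD t v0 = v0 := by
  induction ids generalizing d with
  | nil => exact h
  | cons i ids ih =>
    apply ih
    rw [PySem.Dict.getD_insert]
    split <;> simp [h]

-- on a report with ≥ 2 tokens, A's loop body is a modify at the (reporter, target) pair
theorem pvStepA_eq (d : PySem.Dict String (PySem.Set String × Int)) (r : String)
    (h : 2 ≤ (PySem.Str.split₀ r).length) :
    stepA d r = d.modify (pairOf r).2 (PySem.Set.empty, 0)
                  (fun q => (PySem.Set.add q.1 (pairOf r).1, q.2)) := by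
  have h1 : 1 < (PySem.Str.split₀ r).length := by omega
  have h0 : 0 < (PySem.Str.split₀ r).length := by omega
  have hg1 : PySem.List.pyGet? (PySem.Str.split₀ r) 1
      = some (PySem.List.pyGetD (PySem.Str.split₀ r) 1 "") := by
    simp [PySem.List.pyGet?, PySem.List.pyGetD, PySem.List.pyIdx?, h1]
  have hg0 : PySem.List.pyGet? (PySem.Str.split₀ r) 0
      = some (PySem.List.pyGetD (PySem.Str.split₀ r) 0 "") := by
    simp [PySem.List.pyGet?, PySem.List.pyGetD, PySem.List.pyIdx?, h0]
  simp [stepA, pairOf, hg1, hg0]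

-- A's second loop, rephrased as a fold over the pair list
theorem pvPhase2 (report : List String) (d : PySem.Dict String (PySem.Set String × Int))
    (h : ∀ r ∈ report, 2 ≤ (PySem.Str.split₀ r).length) :
    report.foldl stepA d
      = (report.map pairOf).foldl
          (fun d p => d.modify p.2 (PySem.Set.empty, 0)
            (fun q => (PySem.Set.add q.1 p.1, q.2))) d := by
  rw [List.foldl_map]
  exact PySem.List.foldl_congr_mem report _ _ d (fun acc r hr => pvStepA_eq acc r (h r hr))

-- A's second loop, characterised pointwise
theorem pvA1 (l : List (String × String)) (d : PySem.Dict String (PySem.Set String × Int)) (t : String) :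
    ((l.foldl (fun d p => d.modify p.2 (PySem.Set.empty, 0)
        (fun q => (PySem.Set.add q.1 p.1, q.2))) d).getD t (PySem.Set.empty, 0))
      = ((l.filter (fun p => p.2 == t)).foldl (fun s p => PySem.Set.add s p.1)
           (d.getD t (PySem.Set.empty, 0)).1,
         (d.getD t (PySem.Set.empty, 0)).2) := by
  induction l generalizing d with
  | nil => simp
  | cons p l ih =>
    simp only [List.foldl_cons, List.filter_cons]
    rw [ih, PySem.Dict.getD_modify]
    by_cases hp : t = p.2
    · subst hp
      simp
    · have h2 : (p.2 == t) = false := beq_eq_false_iff_ne.mpr (fun e => hp e.symm)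
      simp [hp, h2]

-- A's inner "+= 1" loop, characterised pointwise
theorem pvA2 (s : List String) (d : PySem.Dict String (PySem.Set String × Int)) (x : String) :
    ((s.foldl (fun d' rp => d'.modify rp (PySem.Set.empty, 0) (fun q => (q.1, q.2 + 1))) d).getD x
        (PySem.Set.empty, 0))
      = ((d.getD x (PySem.Set.empty, 0)).1, (d.getD x (PySem.Set.empty, 0)).2 + (s.count x : Int)) := by
  induction s generalizing d with
  | nil => simp
  | cons rp s ih =>
    simp only [List.foldl_cons, List.count_cons]
    rw [ih, PySem.Dict.getD_modify]
    by_cases hx : x = rp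
    · subst hx
      simp only [BEq.rfl, if_true]
      refine Prod.ext rfl ?_
      push_cast
      ring
    · have h2 : (rp == x) = false := beq_eq_false_iff_ne.mpr (fun e => hx e.symm)
      rw [if_neg hx, h2]
      simp

-- A's third loop, characterised pointwise (σ = the per-target sets, untouched by this loop)
theorem pvA3 (k : Int) (σ : String → PySem.Set String) (hnd : ∀ t, (σ t).Nodup)
    (ts : List String) (d : PySem.Dict String (PySem.Set String × Int))
    (hσ : ∀ t, (d.getD t (PySem.Set.empty, 0)).1 = σ t) (x : String) :
    (ts.foldl (fun d t =>
        let s := (d.getD t (PySem.Set.empty, 0)).1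
        if k ≤ (s.length : Int) then
          s.foldl (fun d' rp => d'.modify rp (PySem.Set.empty, 0) (fun q => (q.1, q.2 + 1))) d
        else d) d).getD x (PySem.Set.empty, 0)
      = (σ x, (d.getD x (PySem.Set.empty, 0)).2 +
          (ts.countP (fun t => decide (k ≤ ((σ t).length : Int)) && decide (x ∈ σ t)) : Int)) := by
  induction ts generalizing d with
  | nil =>
    rw [← hσ x]
    simp
  | cons t0 ts ih =>
    simp only [List.foldl_cons, List.countP_cons]
    rw [hσ t0]
    by_cases hc : k ≤ ((σ t0).length : Int)
    · rw [if_pos hc]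
      have hσ' : ∀ t, (((σ t0).foldl (fun d' rp => d'.modify rp (PySem.Set.empty, 0)
          (fun q => (q.1, q.2 + 1))) d).getD t (PySem.Set.empty, 0)).1 = σ t := by
        intro t
        rw [pvA2]
        exact hσ t
      rw [ih _ hσ', pvA2]
      by_cases hm : x ∈ σ t0
      · rw [List.count_eq_one_of_mem (hnd t0) hm]
        have hcond : (decide (k ≤ ((σ t0).length : Int)) && decide (x ∈ σ t0)) = true := by
          simp [hc, hm]
        rw [hcond]
        refine Prod.ext rfl ?_
        simp only [if_true]
        push_cast
        ring
      · rw [List.count_eq_zero_of_not_mem hm]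
        have hcond : (decide (k ≤ ((σ t0).length : Int)) && decide (x ∈ σ t0)) = false := by
          simp [hm]
        rw [hcond]
        refine Prod.ext rfl ?_
        simp
    · rw [if_neg hc, ih _ hσ]
      simp [hc]

-- two nodup lists with the same members have the same length
theorem pvLenEq {α : Type} [DecidableEq α] (xs ys : List α) (hx : xs.Nodup) (hy : ys.Nodup)
    (h : ∀ a, a ∈ xs ↔ a ∈ ys) : xs.length = ys.length :=
  ((List.perm_ext_iff_of_nodup hx hy).2 h).length_eq

-- counting over two nodup lists whose satisfying members coincide
theorem pvCountPEq {α : Type} [DecidableEq α] (xs ys : List α) (p q : α → Bool)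
    (hx : xs.Nodup) (hy : ys.Nodup) (h : ∀ a, (a ∈ xs ∧ p a = true) ↔ (a ∈ ys ∧ q a = true)) :
    xs.countP p = ys.countP q := by
  rw [List.countP_eq_length_filter, List.countP_eq_length_filter]
  apply pvLenEq _ _ (hx.filter p) (hy.filter q)
  intro a; simp only [List.mem_filter]; exact h a

-- projecting a nodup pair list with fixed second component onto firsts stays nodup
theorem pvNodupMapFst (ps : List (String × String)) (t : String) (h : ps.Nodup) :
    ((ps.filter (fun p => p.2 == t)).map (·.1)).Nodup := by
  refine (h.filter _).map_on ?_
  intro p hp q hq he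
  have h1 : p.2 = t := by simpa using (List.mem_filter.mp hp).2
  have h2 : q.2 = t := by simpa using (List.mem_filter.mp hq).2
  exact Prod.ext he (h1.trans h2.symm)

-- projecting a nodup pair list with fixed first component onto seconds stays nodup
theorem pvNodupMapSnd (ps : List (String × String)) (x : String) (h : ps.Nodup) :
    ((ps.filter (fun p => p.1 == x)).map (·.2)).Nodup := by
  refine (h.filter _).map_on ?_
  intro p hp q hq he
  have h1 : p.1 = x := by simpa using (List.mem_filter.mp hp).2
  have h2 : q.1 = x := by simpa using (List.mem_filter.mp hq).2
  exact Prod.ext (h1.trans h2.symm) he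

-- a first projection of the pairs with target t is a member iff the pair is
theorem pvMemMapFst (ps : List (String × String)) (t a : String) :
    a ∈ ((ps.filter (fun p => p.2 == t)).map (·.1)) ↔ (a, t) ∈ ps := by
  simp only [List.mem_map, List.mem_filter, beq_iff_eq]
  constructor
  · rintro ⟨⟨b, c⟩, ⟨hm, h2⟩, h1⟩
    simp only at h1 h2
    subst h1; subst h2
    exact hm
  · intro hm
    exact ⟨(a, t), ⟨hm, rfl⟩, rfl⟩

-- a second projection of the pairs with reporter x is a member iff the pair is
theorem pvMemMapSnd (ps : List (String × String)) (x a : String) :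
    a ∈ ((ps.filter (fun p => p.1 == x)).map (·.2)) ↔ (x, a) ∈ ps := by
  simp only [List.mem_map, List.mem_filter, beq_iff_eq]
  constructor
  · rintro ⟨⟨b, c⟩, ⟨hm, h2⟩, h1⟩
    simp only at h1 h2
    subst h1; subst h2
    exact hm
  · intro hm
    exact ⟨(x, a), ⟨hm, rfl⟩, rfl⟩

-- membership in A's reporter set
theorem pvMemSig (l : List (String × String)) (t x : String) :
    x ∈ pvSig l t ↔ (x, t) ∈ l := by
  unfold pvSig
  rw [PySem.Set.mem_ofList, pvMemMapFst]

-- cardinality of A's reporter set = number of deduplicated pairs with target t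
theorem pvSigLen (l : List (String × String)) (t : String) :
    (pvSig l t).length = ((PySem.List.dedup l).filter (fun p => p.2 == t)).length := by
  have hnd : (PySem.List.dedup l).Nodup := by
    rw [PySem.List.dedup_eq_ofList]
    exact PySem.Set.nodup_ofList l
  have hlm : (((PySem.List.dedup l).filter (fun p => p.2 == t)).map (·.1)).length
      = ((PySem.List.dedup l).filter (fun p => p.2 == t)).length := List.length_map _
  rw [← hlm]
  refine pvLenEq _ _ (PySem.Set.nodup_ofList _) (pvNodupMapFst _ t hnd) ?_
  intro a
  rw [pvMemSig, pvMemMapFst, PySem.List.mem_dedup]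

-- updating a set with members it already has leaves it unchanged
theorem pvUpdateId (s : PySem.Set String) (xs : List String) (h : ∀ x ∈ xs, x ∈ s) :
    PySem.Set.update s xs = s := by
  induction xs generalizing s with
  | nil => rfl
  | cons x xs ih =>
    have hx : PySem.Set.add s x = s := by
      simp [PySem.Set.add, PySem.Set.contains, h x (by simp)]
    calc PySem.Set.update s (x :: xs)
        = PySem.Set.update (PySem.Set.add s x) xs := rfl
      _ = s := by
          rw [hx]
          exact ih s (fun y hy => h y (by simp [hy]))

-- B's dedup-by-membership loop builds exactly list(dict.fromkeys(map(pairOf, report)))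
theorem pvBPairs (report : List String) :
    bPairs report = PySem.List.dedup (report.map pairOf) := by
  rw [PySem.List.dedup_eq_ofList, PySem.Set.ofList_eq_foldl, List.foldl_map]
  unfold bPairs
  refine PySem.List.foldl_congr_mem report _ _ [] ?_
  intro acc r _
  by_cases h : pairOf r ∈ acc <;>
    simp [PySem.Set.add, PySem.Set.contains, h]

-- ===== VERDICT (by name: the statement is the Claim_ definition above) =====
theorem solution_spec : Claim_equal_solution := by
  intro id_list report k _ hpre
  unfold Spec_solution
  simp only [solution, solution_alt]
  have hlen : ∀ r ∈ report, 2 ≤ (PySem.Str.split₀ r).length := fun r hr => (hpre r hr).1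
  rw [pvPhase2 report _ hlen, PySem.List.foldl_append_singleton_eq_map, List.nil_append,
    pvBPairs report]
  refine List.map_congr_left ?_
  intro id hid
  set l := report.map pairOf with hl
  set pairs := PySem.List.dedup l with hpairs
  set d0 : PySem.Dict String (PySem.Set String × Int) :=
    id_list.foldl (fun d id => d.insert id (PySem.Set.empty, 0)) PySem.Dict.empty with hd0
  set D1 := l.foldl (fun d p => d.modify p.2 (PySem.Set.empty, 0)
    (fun q => (PySem.Set.add q.1 p.1, q.2))) d0 with hD1
  have htgt : ∀ p ∈ l, p.2 ∈ id_list := by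
    intro p hp
    rw [hl] at hp
    obtain ⟨r, hr, rfl⟩ := List.mem_map.mp hp
    exact (hpre r hr).2.1
  have h0 : ∀ t : String, d0.getD t (PySem.Set.empty, 0) = (PySem.Set.empty, 0) := by
    intro t
    rw [hd0]
    exact pvZeroInit _ id_list PySem.Dict.empty t (PySem.Dict.getD_empty t _)
  have h1 : ∀ t, D1.getD t (PySem.Set.empty, 0) = (pvSig l t, 0) := by
    intro t
    rw [hD1, pvA1, h0 t]
    unfold pvSig
    rw [PySem.Set.ofList_eq_foldl, List.foldl_map]
    rfl
  have hsig : ∀ t, (D1.getD t (PySem.Set.empty, 0)).1 = pvSig l t := by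
    intro t; rw [h1 t]
  have hnd : ∀ t, (pvSig l t).Nodup := by
    intro t; unfold pvSig; exact PySem.Set.nodup_ofList _
  have hkeys : D1.keys = PySem.Set.ofList id_list := by
    rw [hD1, PySem.Dict.keys_foldl_modify_key l (fun p => p.2) (PySem.Set.empty, 0)
      (fun _ p q => (PySem.Set.add q.1 p.1, q.2)) d0]
    rw [hd0, PySem.Dict.keys_foldl_insert id_list (fun _ _ => (PySem.Set.empty, 0)) PySem.Dict.empty]
    rw [PySem.Dict.keys_empty]
    have hupd : PySem.Set.update ([] : PySem.Set String) id_list = PySem.Set.ofList id_list := by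
      rw [PySem.Set.ofList_eq_foldl]; rfl
    rw [hupd]
    refine pvUpdateId _ _ ?_
    intro x hx
    rw [PySem.Set.mem_ofList]
    obtain ⟨p, hp, rfl⟩ := List.mem_map.mp hx
    exact htgt p hp
  have hnp : pairs.Nodup := by
    rw [hpairs, PySem.List.dedup_eq_ofList]
    exact PySem.Set.nodup_ofList _
  have hrep : ∀ t, bReporters pairs t = (nReporters report t : Int) := by
    intro t
    unfold bReporters nReporters
    rw [List.countP_eq_length_filter, hpairs, hl]
  have hstep2 : pairs.countP (fun p => (p.1 == id) && decide (k ≤ bReporters pairs p.2))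
      = ((pairs.filter (fun p => p.1 == id)).map (fun p => p.2)).countP
          (fun t => decide (k ≤ bReporters pairs t)) := by
    rw [List.countP_map, List.countP_filter]
    refine List.countP_congr ?_
    intro p _
    simp [Function.comp, Bool.and_comm]
  have hSL : ∀ a, (pvSig l a).length = nReporters report a := by
    intro a
    rw [pvSigLen]
    unfold nReporters
    rw [← hl]
  have hfin : (PySem.Set.ofList id_list).countP
        (fun t => decide (k ≤ ((pvSig l t).length : Int)) && decide (id ∈ pvSig l t))
      = ((pairs.filter (fun p => p.1 == id)).map (fun p => p.2)).countP
          (fun t => decide (k ≤ bReporters pairs t)) := by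
    refine pvCountPEq _ _ _ _ (PySem.Set.nodup_ofList _) (pvNodupMapSnd pairs id hnp) ?_
    intro a
    have hmm : a ∈ (pairs.filter (fun p => p.1 == id)).map (fun p => p.2) ↔ (id, a) ∈ l := by
      rw [show ((pairs.filter (fun p => p.1 == id)).map (fun p => p.2))
          = ((pairs.filter (fun p => p.1 == id)).map (·.2)) from rfl]
      rw [pvMemMapSnd pairs id a, hpairs, PySem.List.mem_dedup]
    rw [hmm, PySem.Set.mem_ofList, hrep a]
    simp only [Bool.and_eq_true, decide_eq_true_eq, pvMemSig, hSL]
    constructor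
    · rintro ⟨_, hk2, hmem⟩
      exact ⟨hmem, hk2⟩
    · rintro ⟨hmem, hk2⟩
      refine ⟨?_, hk2, hmem⟩
      have hmem' := hmem
      rw [hl] at hmem'
      obtain ⟨r, hr, he⟩ := List.mem_map.mp hmem'
      have := (hpre r hr).2.1
      rw [he] at this
      exact this
  rw [pvA3 k (pvSig l) hnd D1.keys D1 hsig id, hkeys, h1 id, hstep2]
  simp only [hfin]
  simp
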